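-- pv_equiv track=rewrite | github.com/JulienVICTORINE/Pocitace24_inventory_project | script2.py | _decode_wmi_ushort_string
-- ===== SOURCE A (Python) =====
-- def _decode_wmi_ushort_string(values):
--     """Decode WMI ushort array into a string (used by monitor WMI classes)."""
--     if not isinstance(values, list):
--         return ""
--     chars = []
--     for v in values:
--         try:
--             iv = int(v)
--         except Exception:
--             continue
--         if iv == 0:
--             break
--         chars.append(chr(iv))
--     return "".join(chars).strip()
-- ===== SOURCE B (Python) =====
-- def _decode_wmi_ushort_string(values):
--     """Decode WMI ushort array into a string (used by monitor WMI classes)."""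
--     if not isinstance(values, list):
--         return ""
--     ints = []
--     for v in values:
--         try:
--             ints.append(int(v))
--         except Exception:
--             continue
--     cut = ints.index(0) if 0 in ints else len(ints)
--     return "".join(map(chr, ints[:cut])).strip()
-- ===== Notes on version B (the rewrite author's own statement) =====
-- stated objective: idiomatic
-- what changed: Replaces A's single loop with break/continue control flow by a build-then-cut-then-map pipeline: collect all ints, locate the first zero with .index guarded by a membership test, slice up to it, then map chr and join/strip.
import Mathlib
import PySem

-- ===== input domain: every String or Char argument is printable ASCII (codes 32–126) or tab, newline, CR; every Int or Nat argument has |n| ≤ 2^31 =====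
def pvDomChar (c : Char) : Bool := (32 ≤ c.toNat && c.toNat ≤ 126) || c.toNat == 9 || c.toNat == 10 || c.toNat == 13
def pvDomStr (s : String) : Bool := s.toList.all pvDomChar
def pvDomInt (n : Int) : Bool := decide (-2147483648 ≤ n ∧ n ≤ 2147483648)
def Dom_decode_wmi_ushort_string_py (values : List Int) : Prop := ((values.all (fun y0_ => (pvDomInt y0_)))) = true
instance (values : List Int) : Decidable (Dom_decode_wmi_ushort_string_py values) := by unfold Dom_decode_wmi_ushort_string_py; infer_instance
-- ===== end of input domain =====

-- B replaces A's break/continue loop by a build-then-cut-then-map pipeline (idiomatic; same cost).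


-- ===== PORT A =====
-- A's loop: break on 0, else append chr(v); int(v) on an int never raises, so the try/continue is vacuous.
def decodeLoopA : List Int → List Char → List Char
  | [], chars => chars
  | v :: rest, chars =>
      if v = 0 then chars
      else decodeLoopA rest (chars ++ [Char.ofNat v.toNat])

def decode_wmi_ushort_string_py (values : List Int) : String :=
  PySem.Str.strip (String.mk (decodeLoopA values []))

-- ===== PORT B =====
def decode_wmi_ushort_string_py_alt (values : List Int) : String :=
  let ints := values.foldl (fun acc v => acc ++ [v]) []
  let cut : Nat := if (0 : Int) ∈ ints then (PySem.List.index? ints (0 : Int)).getD 0 else ints.length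
  let pre := PySem.List.slice ints none (some (cut : Int))
  PySem.Str.strip (String.mk (pre.map (fun v => Char.ofNat v.toNat)))

-- ===== PRECONDITION & SPEC =====
-- Pre_ excludes inputs where some element before the first zero is ≤ 0 or ≥ 0x110000 (Python's chr
-- raises ValueError there, ending A with no value) and, narrowing beyond that, surrogate codes
-- 0xD800–0xDFFF: Python's chr returns a lone-surrogate string there, which is not a value of the
-- Lean String type (no Unicode scalar), so A's result cannot be represented under the convention.
def Pre_decode_wmi_ushort_string_py (values : List Int) : Prop :=
  ∀ v ∈ values.takeWhile (fun v => !(v == 0)), (0 < v ∧ v < 1114112) ∧ ¬(55296 ≤ v ∧ v ≤ 57343)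
instance (values : List Int) : Decidable (Pre_decode_wmi_ushort_string_py values) := by
  unfold Pre_decode_wmi_ushort_string_py; infer_instance

def pvWitness_decode_wmi_ushort_string_py : List Int := [32, 72, 105, 32, 33, 0, 999]

def Spec_decode_wmi_ushort_string_py (values : List Int) (out : String) : Prop := out = decode_wmi_ushort_string_py_alt values
instance (values : List Int) (out : String) : Decidable (Spec_decode_wmi_ushort_string_py values out) := by unfold Spec_decode_wmi_ushort_string_py; infer_instance

-- ===== CLAIM (what is proved, stated in full; the proofs are below) =====
def Claim_equal_decode_wmi_ushort_string_py : Prop := ∀ (values : List Int), Dom_decode_wmi_ushort_string_py values → Pre_decode_wmi_ushort_string_py values → Spec_decode_wmi_ushort_string_py values (decode_wmi_ushort_string_py values)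

-- ===== LEMMAS AND PROOFS =====

-- A's loop builds exactly chr of the elements before the first zero.
lemma decodeLoopA_eq (l : List Int) : ∀ (acc : List Char),
    decodeLoopA l acc = acc ++ (l.takeWhile (fun v => !(v == 0))).map (fun v => Char.ofNat v.toNat) := by
  induction l with
  | nil => intro acc; simp [decodeLoopA]
  | cons v rest ih =>
      intro acc
      by_cases h : v = 0
      · simp [decodeLoopA, h]
      · simp [decodeLoopA, h, ih]

-- B's cut index (first index of 0, or the length) cuts the list exactly at the first zero.
lemma take_cut_eq_takeWhile (l : List Int) :
    l.take ((List.idxOf? (0 : Int) l).getD l.length) = l.takeWhile (fun v => !(v == 0)) := by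
  induction l with
  | nil => simp
  | cons v rest ih =>
      rw [List.idxOf?_cons]
      by_cases h : v = 0
      · subst h; simp
      · have hb : (v == (0 : Int)) = false := by simp [h]
        rw [hb]
        cases hi : List.idxOf? (0 : Int) rest with
        | none => simp [h, hi, ← ih]
        | some k => simp [h, hi, ← ih]

-- B's guarded getD 0 equals the unguarded getD length.
lemma cut_eq (l : List Int) :
    (if (0 : Int) ∈ l then (List.idxOf? (0 : Int) l).getD 0 else l.length)
      = (List.idxOf? (0 : Int) l).getD l.length := by
  by_cases hm : (0 : Int) ∈ l
  · cases hi : List.idxOf? (0 : Int) l with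
    | none => exact absurd (List.idxOf?_eq_none_iff.mp hi) (by simpa using hm)
    | some k => simp [hm]
  · simp [hm, List.idxOf?_eq_none_iff.mpr hm]

-- ===== VERDICT (by name: the statement is the Claim_ definition above) =====
theorem decode_wmi_ushort_string_py_spec : Claim_equal_decode_wmi_ushort_string_py := by
  intro values _ _
  unfold Spec_decode_wmi_ushort_string_py
  unfold decode_wmi_ushort_string_py decode_wmi_ushort_string_py_alt
  dsimp only
  simp only [PySem.List.foldl_append_singleton, List.nil_append, PySem.List.index?_eq_idxOf?]
  rw [cut_eq, PySem.List.slice_to_natCast, take_cut_eq_takeWhile, decodeLoopA_eq]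
  simp
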